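-- pv_equiv track=rewrite | github.com/alexandraback/datacollection | solutions_5646553574277120_0/Python/Aussiroth/C.py | solve
-- ===== SOURCE A (Python) =====
-- def solve(value, currc, ptr):
--     if ptr>=len(currc):
--         return value
--     if value-currc[ptr]==0:
--         return 0
--     else:
--         if value-currc[ptr]>0:
--             return min(solve(value-currc[ptr], currc, ptr+1), solve(value, currc, ptr+1))
--         else:
--             return value
-- ===== SOURCE B (Python) =====
-- def solve(value, currc, ptr):
--     n = len(currc)
--     elems = [currc[p] for p in range(ptr, n)]
--     best = None
--     active = {value}
--     for c in elems:
--         nxt = set()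
--         for v in active:
--             if v == c:
--                 best = 0 if best is None or best > 0 else best
--             elif v > c:
--                 nxt.add(v - c)
--                 nxt.add(v)
--             else:
--                 best = v if best is None or best > v else best
--         active = nxt
--     for v in active:
--         best = v if best is None or best > v else best
--     return best
-- ===== Notes on version B (the rewrite author's own statement) =====
-- stated objective: alternative
-- what changed: replaced the exponential branching recursion by an iterative subset-sum style DP pass that keeps a deduplicated set of reachable leftover values plus a running minimum of finished branches; it trades A's early per-branch pruning for state merging, so it is not measurably faster on random inputs
import Mathlib
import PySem

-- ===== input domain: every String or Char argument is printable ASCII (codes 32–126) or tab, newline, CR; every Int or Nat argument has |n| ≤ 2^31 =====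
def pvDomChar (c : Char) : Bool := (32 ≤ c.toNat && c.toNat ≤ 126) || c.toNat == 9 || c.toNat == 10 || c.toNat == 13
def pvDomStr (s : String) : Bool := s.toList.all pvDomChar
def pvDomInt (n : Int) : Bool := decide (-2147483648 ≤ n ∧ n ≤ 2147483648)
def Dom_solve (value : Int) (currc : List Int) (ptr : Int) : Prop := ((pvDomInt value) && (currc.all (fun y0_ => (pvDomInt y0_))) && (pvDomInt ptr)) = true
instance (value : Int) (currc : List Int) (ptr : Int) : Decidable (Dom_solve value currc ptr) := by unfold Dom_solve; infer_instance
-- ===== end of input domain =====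

-- B replaces A's branching recursion by one left-to-right pass keeping the set of
-- reachable leftover values and a running minimum of finished branches (alternative).

-- ===== PORT A =====
-- fuel = remaining positions + 1, only a structural-termination guard (never reached:
-- ptr grows by 1 per call), so this is A's recursion step for step
def solveGo : Nat → Int → List Int → Int → Int
  | 0, value, _, _ => value
  | k + 1, value, currc, ptr =>
    if (currc.length : Int) ≤ ptr then value
    else
      -- currc[ptr]: in range under Pre_solve; pyGetD is exact there
      let c := PySem.List.pyGetD currc ptr 0
      if value - c = 0 then 0
      else if value - c > 0 then
        min (solveGo k (value - c) currc (ptr + 1)) (solveGo k value currc (ptr + 1))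
      else value

def solve (value : Int) (currc : List Int) (ptr : Int) : Int :=
  solveGo (((currc.length : Int) - ptr).toNat + 1) value currc ptr

-- ===== PORT B =====
-- "v if best is None or best > v else best"
def bmin : Option Int → Int → Option Int
  | none, v => some v
  | some b, v => some (min b v)

-- body of "for v in active" given the current element c
def stepV (c : Int) : Option Int × PySem.Set Int → Int → Option Int × PySem.Set Int
  | (bst, nxt), v =>
    if v = c then (bmin bst 0, nxt)
    else if v > c then (bst, PySem.Set.add (PySem.Set.add nxt (v - c)) v)
    else (bmin bst v, nxt)

-- body of "for c in elems": fold the active set into (best, nxt)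
def stepC (st : Option Int × PySem.Set Int) (c : Int) : Option Int × PySem.Set Int :=
  st.2.foldl (stepV c) (st.1, PySem.Set.empty)

def solve_alt (value : Int) (currc : List Int) (ptr : Int) : Int :=
  let elems := (PySem.List.pyRange ptr (currc.length : Int) 1).map
    (fun p => PySem.List.pyGetD currc p 0)   -- [currc[p] for p in range(ptr, n)]; exact under Pre_solve
  let st := elems.foldl stepC (none, PySem.Set.ofList [value])
  (st.2.foldl bmin st.1).getD 0              -- final "for v in active"; best is never None here

-- ===== PRECONDITION & SPEC =====
-- Pre_solve excludes exactly the inputs where Python raises IndexError: ptr < len(currc) together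
-- with ptr < -len(currc) makes currc[ptr] (and B's currc[p]) raise.
def Pre_solve (value : Int) (currc : List Int) (ptr : Int) : Prop :=
  (currc.length : Int) ≤ ptr ∨ -(currc.length : Int) ≤ ptr
instance (value : Int) (currc : List Int) (ptr : Int) : Decidable (Pre_solve value currc ptr) := by
  unfold Pre_solve; infer_instance

def pvWitness_solve : Int × List Int × Int := (7, ([3, 2], 0))

def Spec_solve (value : Int) (currc : List Int) (ptr : Int) (out : Int) : Prop := out = solve_alt value currc ptr
instance (value : Int) (currc : List Int) (ptr : Int) (out : Int) : Decidable (Spec_solve value currc ptr out) := by unfold Spec_solve; infer_instance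

-- ===== CLAIM (what is proved, stated in full; the proofs are below) =====
def Claim_equal_solve : Prop := ∀ (value : Int) (currc : List Int) (ptr : Int), Dom_solve value currc ptr → Pre_solve value currc ptr → Spec_solve value currc ptr (solve value currc ptr)

-- ===== LEMMAS AND PROOFS =====

-- the list of elements both programs visit, and the branching recursion on that list
def elemsOf (currc : List Int) (ptr : Int) : List Int :=
  (PySem.List.pyRange ptr (currc.length : Int) 1).map (fun p => PySem.List.pyGetD currc p 0)

def fRec : Int → List Int → Int
  | v, [] => v
  | v, c :: rest =>
    if v - c = 0 then 0 else if v - c > 0 then min (fRec (v - c) rest) (fRec v rest) else v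

-- minimum on Option Int (None = no finished branch yet)
def omin : Option Int → Option Int → Option Int
  | none, b => b
  | some a, none => some a
  | some a, some b => some (min a b)

theorem omin_none_right (a : Option Int) : omin a none = a := by cases a <;> rfl

theorem omin_comm (a b : Option Int) : omin a b = omin b a := by
  cases a <;> cases b <;> simp [omin, min_comm]

theorem omin_assoc (a b c : Option Int) : omin (omin a b) c = omin a (omin b c) := by
  cases a <;> cases b <;> cases c <;> simp [omin, min_assoc]

theorem omin_left_comm (a b c : Option Int) : omin a (omin b c) = omin b (omin a c) := by
  rw [← omin_assoc, omin_comm a b, omin_assoc]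

theorem omin_idem_left (a : Option Int) (b : Option Int) : omin a (omin a b) = omin a b := by
  rw [← omin_assoc]; cases a <;> simp [omin]

theorem bmin_eq_omin (b : Option Int) (v : Int) : bmin b v = omin b (some v) := by
  cases b <;> rfl

-- Mf f vs = minimum of f over vs, as an Option
def Mf (f : Int → Int) (vs : List Int) : Option Int :=
  vs.foldl (fun b v => bmin b (f v)) none

theorem foldl_bmin_eq_omin (f : Int → Int) (vs : List Int) :
    ∀ bst : Option Int, vs.foldl (fun b v => bmin b (f v)) bst = omin bst (Mf f vs) := by
  induction vs with
  | nil => intro bst; simp [Mf, List.foldl, omin_none_right]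
  | cons v vs ih =>
    intro bst
    simp only [Mf, List.foldl] at *
    rw [ih, ih (bmin none (f v)), bmin_eq_omin, bmin_eq_omin, omin_assoc]
    rfl

theorem Mf_cons (f : Int → Int) (v : Int) (vs : List Int) :
    Mf f (v :: vs) = omin (some (f v)) (Mf f vs) := by
  simp only [Mf, List.foldl]
  rw [foldl_bmin_eq_omin, bmin_eq_omin]
  rfl

theorem Mf_mem_absorb (f : Int → Int) {x : Int} {vs : List Int} (h : x ∈ vs) :
    omin (some (f x)) (Mf f vs) = Mf f vs := by
  induction vs with
  | nil => cases h
  | cons v vs ih =>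
    rw [Mf_cons]
    rcases List.mem_cons.mp h with rfl | h
    · rw [omin_idem_left]
    · rw [omin_left_comm, ih h]

theorem Mf_append_singleton (f : Int → Int) (vs : List Int) (x : Int) :
    Mf f (vs ++ [x]) = omin (some (f x)) (Mf f vs) := by
  simp only [Mf, List.foldl_append, List.foldl]
  rw [foldl_bmin_eq_omin, bmin_eq_omin, omin_comm]

theorem Mf_add (f : Int → Int) (s : PySem.Set Int) (x : Int) :
    Mf f (PySem.Set.add s x) = omin (some (f x)) (Mf f s) := by
  by_cases h : PySem.Set.contains s x
  · have hx : x ∈ s := by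
      simpa [PySem.Set.contains] using h
    rw [PySem.Set.add, if_pos h, Mf_mem_absorb f hx]
  · rw [PySem.Set.add, if_neg h, Mf_append_singleton]

-- the inner loop "for v in active" preserves the combined minimum
theorem inner_invariant (c : Int) (rest : List Int) (vs : List Int) :
    ∀ (bst : Option Int) (nxt : PySem.Set Int),
      (let st := vs.foldl (stepV c) (bst, nxt)
       omin st.1 (Mf (fun v => fRec v rest) st.2))
      = omin (omin bst (Mf (fun v => fRec v rest) nxt)) (Mf (fun v => fRec v (c :: rest)) vs) := by
  induction vs with
  | nil => intro bst nxt; simp [Mf, List.foldl, omin_none_right]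
  | cons v vs ih =>
    intro bst nxt
    simp only [List.foldl]
    rw [Mf_cons]
    by_cases h0 : v = c
    · have hf : fRec v (c :: rest) = 0 := by simp [fRec, h0]
      rw [stepV, if_pos h0, ih, hf, bmin_eq_omin]
      simp only [omin_assoc]
      rw [omin_left_comm (Mf (fun v => fRec v rest) nxt)]
    · by_cases h1 : v > c
      · have hf : fRec v (c :: rest) = min (fRec (v - c) rest) (fRec v rest) := by
          rw [fRec]
          rw [if_neg (by omega), if_pos (by omega)]
        rw [stepV, if_neg h0, if_pos h1, ih, Mf_add, Mf_add, hf]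
        have : (some (min (fRec (v - c) rest) (fRec v rest))) =
            omin (some (fRec (v - c) rest)) (some (fRec v rest)) := rfl
        rw [this]
        simp [omin_assoc, omin_comm, omin_left_comm]
      · have hf : fRec v (c :: rest) = v := by
          rw [fRec, if_neg (by omega), if_neg (by omega)]
        rw [stepV, if_neg h0, if_neg h1, ih, hf, bmin_eq_omin]
        simp only [omin_assoc]
        rw [omin_left_comm (Mf (fun v => fRec v rest) nxt)]

-- the outer loop "for c in elems" computes the minimum over all branches of fRec
theorem outer_invariant (elems : List Int) :
    ∀ (bst : Option Int) (act : PySem.Set Int),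
      (let st := elems.foldl stepC (bst, act)
       omin st.1 (Mf (fun v => fRec v []) st.2))
      = omin bst (Mf (fun v => fRec v elems) act) := by
  induction elems with
  | nil => intro bst act; rfl
  | cons c elems ih =>
    intro bst act
    simp only [List.foldl]
    rw [ih]
    have h := inner_invariant c elems act bst PySem.Set.empty
    simp only [stepC]
    rw [h]
    simp [Mf, PySem.Set.empty, omin_none_right]

theorem solve_alt_eq_fRec (value : Int) (currc : List Int) (ptr : Int) :
    solve_alt value currc ptr = fRec value (elemsOf currc ptr) := by
  unfold solve_alt
  simp only
  rw [foldl_bmin_eq_omin (fun v => v)]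
  have hω : Mf (fun v => v) = Mf (fun v => fRec v []) := by
    funext vs; rfl
  rw [hω]
  rw [outer_invariant]
  show (omin none (Mf (fun v => fRec v (elemsOf currc ptr)) (PySem.Set.ofList [value]))).getD 0 = _
  have : PySem.Set.ofList [value] = [value] := rfl
  rw [this, Mf_cons]
  rfl

theorem solveGo_eq_fRec (currc : List Int) :
    ∀ (k : Nat) (value ptr : Int), ((currc.length : Int) - ptr).toNat < k →
      solveGo k value currc ptr = fRec value (elemsOf currc ptr) := by
  intro k
  induction k with
  | zero => intro value ptr hk; omega
  | succ k ih =>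
    intro value ptr hk
    by_cases h : (currc.length : Int) ≤ ptr
    · rw [solveGo, if_pos h]
      unfold elemsOf
      rw [PySem.List.pyRange_one_eq_nil h]
      rfl
    · have hlt : ptr < (currc.length : Int) := by omega
      have hcons : elemsOf currc ptr
          = PySem.List.pyGetD currc ptr 0 :: elemsOf currc (ptr + 1) := by
        unfold elemsOf
        rw [PySem.List.pyRange_one_cons hlt]
        rfl
      rw [solveGo, if_neg h, hcons]
      have hrec := ih
      rw [fRec]
      by_cases h0 : value - PySem.List.pyGetD currc ptr 0 = 0
      · rw [if_pos h0, if_pos h0]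
      · rw [if_neg h0, if_neg h0]
        by_cases h1 : value - PySem.List.pyGetD currc ptr 0 > 0
        · rw [if_pos h1, if_pos h1,
            hrec _ (ptr + 1) (by omega), hrec _ (ptr + 1) (by omega)]
        · rw [if_neg h1, if_neg h1]

-- ===== VERDICT (by name: the statement is the Claim_ definition above) =====
theorem solve_spec : Claim_equal_solve := by
  intro value currc ptr _hDom _hPre
  unfold Spec_solve
  rw [solve_alt_eq_fRec]
  unfold solve
  rw [solveGo_eq_fRec currc _ value ptr (by omega)]
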